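-- pv_equiv track=rewrite | github.com/philipwilsonTHG/psh | psh/executor/test_evaluator.py | _process_escape_sequences
-- ===== SOURCE A (Python) =====
-- def _process_escape_sequences(text: str) -> str:
--     """Process escape sequences in test expression operands."""
--     if not text or '\\' not in text:
--         return text
--
--     result = []
--     i = 0
--     while i < len(text):
--         if text[i] == '\\' and i + 1 < len(text):
--             result.append(text[i + 1])
--             i += 2
--         else:
--             result.append(text[i])
--             i += 1
--
--     return ''.join(result)
-- ===== SOURCE B (Python) =====
-- def _process_escape_sequences(text: str) -> str:
--     """Process escape sequences in test expression operands."""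
--     parts = text.split('\\')
--     out = [parts[0]]
--     i = 1
--     while i < len(parts):
--         p = parts[i]
--         if p:
--             # the backslash escaped p[0]; the rest of p is literal
--             out.append(p)
--             i += 1
--         else:
--             # empty piece: the escaped character was a backslash itself
--             out.append('\\' + (parts[i + 1] if i + 1 < len(parts) else ''))
--             i += 2
--     return ''.join(out)
-- ===== Notes on version B (the rewrite author's own statement) =====
-- stated objective: idiomatic
-- what changed: Replaces the index-stepping character scan with str.split('\\') followed by one pass over the split pieces that rejoins them while dropping the escaping backslashes (an empty piece marks an escaped backslash).
import Mathlib
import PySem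

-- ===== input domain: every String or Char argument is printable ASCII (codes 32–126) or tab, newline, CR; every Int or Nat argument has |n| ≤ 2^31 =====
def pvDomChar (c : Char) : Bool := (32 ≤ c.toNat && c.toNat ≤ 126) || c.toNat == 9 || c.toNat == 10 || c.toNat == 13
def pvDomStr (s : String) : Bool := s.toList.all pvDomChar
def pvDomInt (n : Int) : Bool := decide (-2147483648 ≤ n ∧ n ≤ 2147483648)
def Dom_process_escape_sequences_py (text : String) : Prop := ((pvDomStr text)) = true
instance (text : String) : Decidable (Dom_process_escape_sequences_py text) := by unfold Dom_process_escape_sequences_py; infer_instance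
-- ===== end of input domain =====

-- B replaces A's index-stepping character scan with split-on-backslash + one rejoining pass (idiomatic, same cost).


-- ===== PORT A =====
-- the while loop: text[i]=='\\' and i+1<len(text) consumes two chars, else one
def pvScanA : List Char → List Char
  | [] => []
  | c :: rest =>
    if c = '\\' then
      match rest with
      | d :: rest' => d :: pvScanA rest'
      | [] => c :: pvScanA []
    else c :: pvScanA rest

def process_escape_sequences_py (text : String) : String :=
  if text.toList = [] ∨ '\\' ∉ text.toList then text
  else String.ofList (pvScanA text.toList)

-- ===== PORT B =====
-- the while loop over parts[1:]: a nonempty piece starts with its escaped char; an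
-- empty piece means the escaped char was a backslash, consuming the next piece too
def pvGoB : List (List Char) → List (List Char)
  | [] => []
  | p :: rest =>
    if p ≠ [] then p :: pvGoB rest
    else
      match rest with
      | [] => [['\\']]
      | q :: rest' => ('\\' :: q) :: pvGoB rest'

def process_escape_sequences_py_alt (text : String) : String :=
  match PySem.Chars.splitOn text.toList ['\\'] with
  | [] => ""   -- unreachable: Python split never returns an empty list
  | p0 :: rest => String.ofList (PySem.Chars.join [] (p0 :: pvGoB rest))

-- ===== PRECONDITION & SPEC =====
def Spec_process_escape_sequences_py (text : String) (out : String) : Prop := out = process_escape_sequences_py_alt text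
instance (text : String) (out : String) : Decidable (Spec_process_escape_sequences_py text out) := by unfold Spec_process_escape_sequences_py; infer_instance

-- ===== CLAIM (what is proved, stated in full; the proofs are below) =====
def Claim_equal_process_escape_sequences_py : Prop := ∀ (text : String), Dom_process_escape_sequences_py text → Spec_process_escape_sequences_py text (process_escape_sequences_py text)

-- ===== LEMMAS AND PROOFS =====

-- reference split on '\\', no fuel
def pvSp : List Char → List (List Char)
  | [] => [[]]
  | c :: r =>
    if c = '\\' then [] :: pvSp r
    else
      match pvSp r with
      | p :: ps => (c :: p) :: ps
      | [] => [[c]]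

theorem pvSp_ne_nil (l : List Char) : pvSp l ≠ [] := by
  induction l using pvSp.induct <;> simp_all [pvSp]

theorem pvSplitOn_go_eq (fuel : Nat) : ∀ (l cur : List Char) (acc : List (List Char)),
    l.length < fuel →
    PySem.Chars.splitOn.go ['\\'] fuel l cur acc =
      acc.reverse ++ (match pvSp l with
        | p :: ps => (cur.reverse ++ p) :: ps
        | [] => [cur.reverse]) := by
  induction fuel with
  | zero => intro l cur acc h; omega
  | succ f ih =>
    intro l cur acc h
    cases l with
    | nil => simp [PySem.Chars.splitOn.go, pvSp]
    | cons c rest =>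
      by_cases hc : c = '\\'
      · subst hc
        have hpre : List.isPrefixOf ['\\'] ('\\' :: rest) = true := by
          simp [List.isPrefixOf]
        rw [PySem.Chars.splitOn.go, if_pos hpre]
        simp only [List.length, List.drop]
        rw [ih rest [] (cur.reverse :: acc) (by simpa using Nat.lt_of_succ_lt_succ h)]
        have := pvSp_ne_nil rest
        cases hsp : pvSp rest with
        | nil => exact absurd hsp this
        | cons p ps => simp [pvSp, hsp]
      · have hpre : List.isPrefixOf ['\\'] (c :: rest) = false := by
          simp [List.isPrefixOf]; intro hh; exact hc hh.symm
        rw [PySem.Chars.splitOn.go, if_neg (by simp [hpre])]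
        rw [ih rest (c :: cur) acc (by simpa using Nat.lt_of_succ_lt_succ h)]
        have := pvSp_ne_nil rest
        cases hsp : pvSp rest with
        | nil => exact absurd hsp this
        | cons p ps =>
          simp [pvSp, hc, hsp, List.reverse_cons]

theorem pvSplitOn_eq (l : List Char) : PySem.Chars.splitOn l ['\\'] = pvSp l := by
  unfold PySem.Chars.splitOn
  rw [pvSplitOn_go_eq (l.length + 1) l [] [] (Nat.lt_succ_self _)]
  have := pvSp_ne_nil l
  cases hsp : pvSp l with
  | nil => exact absurd hsp this
  | cons p ps => simp

-- B's reassembly of the split pieces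
def pvF : List (List Char) → List Char
  | [] => []
  | p0 :: rest => p0 ++ (pvGoB rest).flatten

theorem pvJoin_nil (ps : List (List Char)) : PySem.Chars.join [] ps = ps.flatten := by
  induction ps with
  | nil => simp [PySem.Chars.join, List.intercalate]
  | cons p t ih =>
    cases t with
    | nil => simp [PySem.Chars.join, List.intercalate]
    | cons q t' =>
      simp only [PySem.Chars.join, List.intercalate, List.intersperse] at *
      simp_all

theorem pvScanA_cons_ne (c : Char) (rest : List Char) (h : ¬ c = '\\') :
    pvScanA (c :: rest) = c :: pvScanA rest := by
  conv_lhs => unfold pvScanA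
  rw [if_neg h]

theorem pvScanA_bs_cons (d : Char) (rest' : List Char) :
    pvScanA ('\\' :: d :: rest') = d :: pvScanA rest' := by
  conv_lhs => unfold pvScanA
  rfl

theorem pvGoB_cons_ne (p : List Char) (rest : List (List Char)) (h : p ≠ []) :
    pvGoB (p :: rest) = p :: pvGoB rest := by
  conv_lhs => unfold pvGoB
  rw [if_pos h]

theorem pvScanA_eq_F (l : List Char) : pvScanA l = pvF (pvSp l) := by
  induction l using pvScanA.induct with
  | case1 => rfl
  | case2 d rest' ih =>
    by_cases hd : d = '\\'
    · subst hd
      have hne := pvSp_ne_nil rest'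
      cases hsp : pvSp rest' with
      | nil => exact absurd hsp hne
      | cons q ps => simp [pvScanA, pvSp, pvF, pvGoB, hsp, ih]
    · have hne := pvSp_ne_nil rest'
      cases hsp : pvSp rest' with
      | nil => exact absurd hsp hne
      | cons q ps =>
        rw [pvScanA_bs_cons, ih]
        simp [pvSp, pvF, hd, hsp]
        rw [pvGoB_cons_ne (d :: q) ps (by simp)]
        simp
  | case3 => rfl
  | case4 c rest hc ih =>
    have hne := pvSp_ne_nil rest
    cases hsp : pvSp rest with
    | nil => exact absurd hsp hne
    | cons q ps =>
      rw [pvScanA_cons_ne c rest hc, ih, hsp]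
      simp [pvSp, pvF, hc, hsp]

theorem pvScanA_id (l : List Char) (h : '\\' ∉ l) : pvScanA l = l := by
  induction l with
  | nil => simp [pvScanA]
  | cons c rest ih =>
    simp only [List.mem_cons, not_or] at h
    rw [pvScanA_cons_ne _ _ (fun hc => h.1 hc.symm), ih h.2]

theorem pvAlt_eq (text : String) :
    process_escape_sequences_py_alt text = String.ofList (pvScanA text.toList) := by
  unfold process_escape_sequences_py_alt
  rw [pvSplitOn_eq]
  have hne := pvSp_ne_nil text.toList
  cases hsp : pvSp text.toList with
  | nil => exact absurd hsp hne
  | cons p ps =>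
    show String.ofList (PySem.Chars.join [] (p :: pvGoB ps)) = _
    rw [pvJoin_nil, pvScanA_eq_F, hsp]
    simp [pvF]

-- ===== VERDICT (by name: the statement is the Claim_ definition above) =====
theorem process_escape_sequences_py_spec : Claim_equal_process_escape_sequences_py := by
  intro text _
  show process_escape_sequences_py text = process_escape_sequences_py_alt text
  rw [pvAlt_eq]
  have hid : String.ofList text.toList = text := String.ofList_toList
  unfold process_escape_sequences_py
  split_ifs with h
  · rcases h with h | h
    · have ht : text = "" := by rw [← hid, h]
      rw [ht]; rfl
    · rw [pvScanA_id _ h, hid]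
  · rfl
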